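-- pv_equiv track=rewrite | github.com/jimiduiveman/RushHour | application.py | updateVehicles
-- ===== SOURCE A (Python) =====
-- def updateVehicles(grid:dict):
-- 	vehicles_dict = {}
-- 	for coordinate in grid:
-- 		id = grid[coordinate]
-- 		if id != 0:
-- 			if id not in vehicles_dict:
-- 				vehicles_dict[id] = [coordinate]
-- 			else:
-- 				vehicles_dict[id].append(coordinate)
-- 	return vehicles_dict
-- ===== SOURCE B (Python) =====
-- def updateVehicles(grid: dict):
--     ids = []
--     for v in grid.values():
--         if v != 0 and v not in ids:
--             ids.append(v)
--     return {i: [c for c, v in grid.items() if v == i] for i in ids}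
-- ===== Notes on version B (the rewrite author's own statement) =====
-- stated objective: alternative
-- what changed: A builds the result in one pass by conditionally creating/appending to dict entries; B first collects the distinct nonzero ids in first-occurrence order and then builds the dict with one filter comprehension per id.
import Mathlib
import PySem

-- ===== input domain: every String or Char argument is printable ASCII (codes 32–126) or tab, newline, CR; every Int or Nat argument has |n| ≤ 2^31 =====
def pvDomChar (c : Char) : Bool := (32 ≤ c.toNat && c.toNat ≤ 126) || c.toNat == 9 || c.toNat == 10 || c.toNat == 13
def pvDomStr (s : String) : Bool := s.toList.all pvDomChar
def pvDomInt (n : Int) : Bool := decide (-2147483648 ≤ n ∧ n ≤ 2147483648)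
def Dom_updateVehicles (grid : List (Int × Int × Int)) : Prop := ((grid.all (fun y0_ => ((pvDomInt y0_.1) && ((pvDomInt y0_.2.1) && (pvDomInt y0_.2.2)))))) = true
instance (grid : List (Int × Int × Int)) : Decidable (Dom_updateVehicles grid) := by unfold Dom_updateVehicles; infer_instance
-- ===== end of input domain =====

-- B replaces A's conditional dict mutation by a first-occurrence list of ids plus a
-- per-id filter comprehension (simpler decomposition; not faster: O(n*k) vs A's O(n)).

-- ===== PORT A =====
def updateVehicles (grid : List (Int × Int × Int)) : List (Int × List (Int × Int)) :=
  (grid.foldl (fun vehicles_dict t =>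
      let coordinate : Int × Int := (t.1, t.2.1)
      let id : Int := t.2.2
      if id ≠ 0 then
        if vehicles_dict.contains id = false then vehicles_dict.insert id [coordinate]
        else vehicles_dict.modify id [] (fun l => l ++ [coordinate])
      else vehicles_dict)
    (PySem.Dict.empty : PySem.Dict Int (List (Int × Int)))).items

-- ===== PORT B =====
def updateVehicles_alt (grid : List (Int × Int × Int)) : List (Int × List (Int × Int)) :=
  let ids : List Int :=
    grid.foldl (fun acc t => if t.2.2 ≠ 0 ∧ t.2.2 ∉ acc then acc ++ [t.2.2] else acc) []
  ids.map (fun i => (i, (grid.filter (fun t => t.2.2 == i)).map (fun t => (t.1, t.2.1))))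

-- ===== PRECONDITION & SPEC =====
def Spec_updateVehicles (grid : List (Int × Int × Int)) (out : List (Int × List (Int × Int))) : Prop := out = updateVehicles_alt grid
instance (grid : List (Int × Int × Int)) (out : List (Int × List (Int × Int))) : Decidable (Spec_updateVehicles grid out) := by unfold Spec_updateVehicles; infer_instance

-- ===== CLAIM (what is proved, stated in full; the proofs are below) =====
def Claim_equal_updateVehicles : Prop := ∀ (grid : List (Int × Int × Int)), Dom_updateVehicles grid → Spec_updateVehicles grid (updateVehicles grid)

-- ===== LEMMAS AND PROOFS =====

-- A's loop body, named for the lemmas below.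
def pvStepA (d : PySem.Dict Int (List (Int × Int))) (t : Int × Int × Int) : PySem.Dict Int (List (Int × Int)) :=
  if t.2.2 ≠ 0 then
    if d.contains t.2.2 = false then d.insert t.2.2 [(t.1, t.2.1)]
    else d.modify t.2.2 [] (fun l => l ++ [(t.1, t.2.1)])
  else d

lemma stepA_eq_modify (d : PySem.Dict Int (List (Int × Int))) (t : Int × Int × Int) (h : t.2.2 ≠ 0) :
    pvStepA d t = d.modify t.2.2 [] (fun l => l ++ [(t.1, t.2.1)]) := by
  simp only [pvStepA, if_pos h]
  by_cases hc : d.contains t.2.2 = false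
  · rw [if_pos hc, PySem.Dict.modify, PySem.Dict.getD_of_not_contains d _ hc]
    rfl
  · simp [hc]

lemma getD_foldA (grid : List (Int × Int × Int)) (d : PySem.Dict Int (List (Int × Int))) (i : Int) (hi : i ≠ 0) :
    (grid.foldl pvStepA d).getD i [] =
      d.getD i [] ++ (grid.filter (fun t => t.2.2 == i)).map (fun t => (t.1, t.2.1)) := by
  induction grid generalizing d with
  | nil => simp
  | cons t rest ih =>
    by_cases h0 : t.2.2 = 0
    · have h0i : ¬ (0 = i) := fun h => hi h.symm
      simp [List.foldl_cons, pvStepA, h0, ih, h0i]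
    · rw [List.foldl_cons, stepA_eq_modify d t h0, ih]
      by_cases hti : t.2.2 = i
      · simp [hti, PySem.Dict.getD_modify_self]
      · have hne : i ≠ t.2.2 := fun h => hti h.symm
        rw [PySem.Dict.getD_modify_of_ne _ _ _ hne]
        simp [hti]

lemma keys_foldA (grid : List (Int × Int × Int)) (d : PySem.Dict Int (List (Int × Int))) :
    (grid.foldl pvStepA d).keys =
      grid.foldl (fun acc t => if t.2.2 ≠ 0 ∧ t.2.2 ∉ acc then acc ++ [t.2.2] else acc) d.keys := by
  induction grid generalizing d with
  | nil => rfl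
  | cons t rest ih =>
    by_cases h0 : t.2.2 = 0
    · simp [List.foldl_cons, pvStepA, h0, ih]
    · rw [List.foldl_cons, stepA_eq_modify d t h0, ih, List.foldl_cons]
      congr 1
      rw [PySem.Dict.keys_modify]
      by_cases hm : t.2.2 ∈ d.keys
      · rw [PySem.Dict.keys_insert_of_contains]
        · simp [hm]
        · rw [PySem.Dict.contains_eq_decide_mem_keys]; simp [hm]
      · rw [PySem.Dict.keys_insert_of_not_contains]
        · simp [hm, h0]
        · rw [PySem.Dict.contains_eq_decide_mem_keys]; simp [hm]

lemma nodup_idsFold (grid : List (Int × Int × Int)) (acc : List Int) (h : acc.Nodup) :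
    (grid.foldl (fun acc t => if t.2.2 ≠ 0 ∧ t.2.2 ∉ acc then acc ++ [t.2.2] else acc) acc).Nodup := by
  induction grid generalizing acc with
  | nil => exact h
  | cons t rest ih =>
    rw [List.foldl_cons]
    by_cases hc : t.2.2 ≠ 0 ∧ t.2.2 ∉ acc
    · rw [if_pos hc]
      refine ih _ ?_
      simp [List.nodup_append, h]
      intro a ha heq
      exact hc.2 (heq ▸ ha)
    · rw [if_neg hc]; exact ih _ h

lemma mem_idsFold_ne_zero (grid : List (Int × Int × Int)) (acc : List Int) (i : Int)
    (hm : i ∈ grid.foldl (fun acc t => if t.2.2 ≠ 0 ∧ t.2.2 ∉ acc then acc ++ [t.2.2] else acc) acc) :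
    i ∈ acc ∨ i ≠ 0 := by
  induction grid generalizing acc with
  | nil => exact Or.inl hm
  | cons t rest ih =>
    rw [List.foldl_cons] at hm
    by_cases hc : t.2.2 ≠ 0 ∧ t.2.2 ∉ acc
    · rw [if_pos hc] at hm
      rcases ih _ hm with h | h
      · rcases List.mem_append.1 h with h | h
        · exact Or.inl h
        · simp at h; exact Or.inr (h ▸ hc.1)
      · exact Or.inr h
    · rw [if_neg hc] at hm; exact ih _ hm

-- ===== VERDICT (by name: the statement is the Claim_ definition above) =====
theorem updateVehicles_spec : Claim_equal_updateVehicles := by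
  intro grid _
  show updateVehicles grid = updateVehicles_alt grid
  unfold updateVehicles updateVehicles_alt
  have hfold : ∀ (d : PySem.Dict Int (List (Int × Int))),
      grid.foldl (fun vehicles_dict t =>
        let coordinate : Int × Int := (t.1, t.2.1)
        let id : Int := t.2.2
        if id ≠ 0 then
          if vehicles_dict.contains id = false then vehicles_dict.insert id [coordinate]
          else vehicles_dict.modify id [] (fun l => l ++ [coordinate])
        else vehicles_dict) d = grid.foldl pvStepA d := by
    intro d; rfl
  rw [hfold]
  set D := grid.foldl pvStepA (PySem.Dict.empty : PySem.Dict Int (List (Int × Int))) with hD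
  have hkeys : D.keys = grid.foldl (fun acc t => if t.2.2 ≠ 0 ∧ t.2.2 ∉ acc then acc ++ [t.2.2] else acc) [] := by
    rw [hD, keys_foldA]; rfl
  have hnd : D.keys.Nodup := by rw [hkeys]; exact nodup_idsFold _ _ List.nodup_nil
  rw [PySem.Dict.items_eq_map_keys D hnd ([] : List (Int × Int)), hkeys]
  apply List.map_congr_left
  intro i hi
  have hi0 : i ≠ 0 := by
    rcases mem_idsFold_ne_zero grid [] i hi with h | h
    · simp at h
    · exact h
  have := getD_foldA grid (PySem.Dict.empty : PySem.Dict Int (List (Int × Int))) i hi0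
  rw [hD, this]
  simp
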